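-- pv_equiv track=rewrite | github.com/jcschindler01/multipartite | multipartite/multipartite.py | mind
-- ===== SOURCE A (Python) =====
-- def mind(n=[2,2], hold='xx'):
-- 	ss = [''.join([str(i) for i in range(nn)]) for nn in n]
-- 	for i in range(len(n)):
-- 		if not hold[i] == 'x':
-- 			ss[i] = hold[i]
-- 	ijk= [x for x in ss[0]]
-- 	for s in ss[1:]:
-- 		ijk = [x+y for x in ijk for y in s]
-- 	return tuple(ijk)
-- ===== SOURCE B (Python) =====
-- def mind(n=[2,2], hold='xx'):
-- 	ss = [''.join([str(i) for i in range(nn)]) for nn in n]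
-- 	for i in range(len(n)):
-- 		if not hold[i] == 'x':
-- 			ss[i] = hold[i]
-- 	total = 1
-- 	for s in ss:
-- 		total *= len(s)
-- 	out = []
-- 	for k in range(total):
-- 		chars = []
-- 		for s in reversed(ss):
-- 			k, d = divmod(k, len(s))
-- 			chars.append(s[d])
-- 		out.append(''.join(reversed(chars)))
-- 	return tuple(out)
-- ===== Notes on version B (the rewrite author's own statement) =====
-- stated objective: alternative
-- what changed: B replaces A's repeated list-expansion (rebuilding the whole product list once per dimension) by counting k from 0 to the product of the alphabet lengths and decoding each k into one output string by mixed-radix divmod over the dimensions.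
import Mathlib
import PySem

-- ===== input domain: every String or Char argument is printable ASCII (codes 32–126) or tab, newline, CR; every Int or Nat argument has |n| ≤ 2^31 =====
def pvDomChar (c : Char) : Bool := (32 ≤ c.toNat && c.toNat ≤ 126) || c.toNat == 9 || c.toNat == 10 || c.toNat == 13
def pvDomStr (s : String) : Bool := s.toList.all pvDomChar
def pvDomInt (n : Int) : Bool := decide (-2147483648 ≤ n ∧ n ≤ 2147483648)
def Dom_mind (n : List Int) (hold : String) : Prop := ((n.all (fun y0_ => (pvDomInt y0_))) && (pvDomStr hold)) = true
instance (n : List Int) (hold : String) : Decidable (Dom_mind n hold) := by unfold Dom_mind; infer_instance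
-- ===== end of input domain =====

-- B enumerates the Cartesian product by mixed-radix divmod decoding of a running index instead of A's repeated list expansion (return value equivalence).

-- ===== PORT A =====
-- ss = [''.join([str(i) for i in range(nn)]) for nn in n]; then hold[i] replacement loop
def mindSS (n : List Int) (hold : String) : List (List Char) :=
  let ss0 : List (List Char) :=
    n.map (fun nn => ((PySem.List.pyRange 0 nn 1).map (fun i => PySem.Int.toChars i)).flatten)
  (PySem.List.pyRange 0 (PySem.List.len n) 1).foldl
    (fun ss i =>
      let c := PySem.List.pyGetD hold.toList i 'x'   -- hold[i]; in range under Pre_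
      if ¬ (c = 'x') then PySem.List.pySetD ss i [c] else ss) ss0

def mind (n : List Int) (hold : String) : List String :=
  ((PySem.List.slice (mindSS n hold) (some 1) none).foldl                        -- for s in ss[1:]
      (fun ijk s => ijk.flatMap (fun x => s.map (fun y => x ++ [y])))            -- [x+y for x in ijk for y in s]
      ((PySem.List.pyGetD (mindSS n hold) 0 []).map (fun c => [c]))              -- [x for x in ss[0]]
    ).map (fun cs => String.ofList cs)

-- ===== PORT B =====
-- same ss construction as in Source B (its first four lines are A's)
def mindAltSS (n : List Int) (hold : String) : List (List Char) :=
  let ss0 : List (List Char) :=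
    n.map (fun nn => ((PySem.List.pyRange 0 nn 1).map (fun i => PySem.Int.toChars i)).flatten)
  (PySem.List.pyRange 0 (PySem.List.len n) 1).foldl
    (fun ss i =>
      let c := PySem.List.pyGetD hold.toList i 'x'
      if ¬ (c = 'x') then PySem.List.pySetD ss i [c] else ss) ss0

def mind_alt (n : List Int) (hold : String) : List String :=
  (PySem.List.pyRange 0
      ((mindAltSS n hold).foldl (fun acc s => acc * PySem.List.len s) 1) 1).map  -- total *= len(s); for k in range(total)
    (fun k =>
      String.ofList (((mindAltSS n hold).reverse.foldl                           -- for s in reversed(ss)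
        (fun (p : Int × List Char) s =>
          match PySem.Int.divmod? p.1 (PySem.List.len s) with                    -- k, d = divmod(k, len(s))
          | some qd => (qd.1, p.2 ++ [PySem.List.pyGetD s qd.2 ' '])             -- chars.append(s[d])
          | none => p) (k, ([] : List Char))).2.reverse)                         -- ''.join(reversed(chars))
    )

-- ===== PRECONDITION & SPEC =====
-- Pre_ excludes exactly the inputs on which A raises: empty n (IndexError on ss[0])
-- and hold shorter than n (IndexError on hold[i]).
def Pre_mind (n : List Int) (hold : String) : Prop :=
  n ≠ [] ∧ n.length ≤ hold.toList.length
instance (n : List Int) (hold : String) : Decidable (Pre_mind n hold) := by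
  unfold Pre_mind; infer_instance

def pvWitness_mind : List Int × String := ([2, 2], "xx")

def Spec_mind (n : List Int) (hold : String) (out : List String) : Prop := out = mind_alt n hold
instance (n : List Int) (hold : String) (out : List String) : Decidable (Spec_mind n hold out) := by
  unfold Spec_mind; infer_instance

-- ===== CLAIM (what is proved, stated in full; the proofs are below) =====
def Claim_equal_mind : Prop := ∀ (n : List Int) (hold : String), Dom_mind n hold → Pre_mind n hold → Spec_mind n hold (mind n hold)

-- ===== LEMMAS AND PROOFS =====

-- reference product: A's expansion step, folded from [[]]
def pvStep (ijk : List (List Char)) (s : List Char) : List (List Char) :=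
  ijk.flatMap (fun x => s.map (fun y => x ++ [y]))
def pvR (ls : List (List Char)) : List (List Char) := ls.foldl pvStep [[]]
def pvProd (ls : List (List Char)) : Nat := (ls.map List.length).prod
-- mixed-radix decode on the REVERSED dimension list (head = last dimension)
def pvDec : List (List Char) → Nat → List Char
  | [], _ => []
  | s :: rest, k => pvDec rest (k / s.length) ++ [s.getD (k % s.length) ' ']

theorem ss_alt_eq (n : List Int) (hold : String) : mindAltSS n hold = mindSS n hold := rfl

theorem length_foldl_pySetD {α : Type} (idxs : List Int) (g : Int → α)
    (cond : Int → Bool) (ss : List α) :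
    (idxs.foldl (fun ss i => if cond i then PySem.List.pySetD ss i (g i) else ss) ss).length
      = ss.length := by
  induction idxs generalizing ss with
  | nil => rfl
  | cons i rest ih =>
    simp only [List.foldl_cons]
    rw [ih]
    by_cases h : cond i <;> simp [h, PySem.List.length_pySetD]

theorem length_mindSS (n : List Int) (hold : String) : (mindSS n hold).length = n.length := by
  unfold mindSS
  simp only []
  rw [show (fun (ss : List (List Char)) (i : Int) =>
        let c := PySem.List.pyGetD hold.toList i 'x'
        if ¬ (c = 'x') then PySem.List.pySetD ss i [c] else ss)
      = (fun ss i => if (decide ¬ (PySem.List.pyGetD hold.toList i 'x' = 'x')) then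
          PySem.List.pySetD ss i [PySem.List.pyGetD hold.toList i 'x'] else ss) from by
    funext ss i; simp]
  rw [length_foldl_pySetD]
  simp

-- A = pvR ∘ mindSS (needs ss ≠ [])
theorem A_eq (n : List Int) (hold : String) (h : n ≠ []) :
    mind n hold = (pvR (mindSS n hold)).map String.ofList := by
  have hlen : (mindSS n hold).length = n.length := length_mindSS n hold
  have hne : mindSS n hold ≠ [] := by
    intro e; rw [e] at hlen; exact h (List.eq_nil_of_length_eq_zero hlen.symm)
  obtain ⟨s0, rest, e⟩ := List.exists_cons_of_ne_nil hne
  unfold mind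
  rw [e]
  have hslice : PySem.List.slice (s0 :: rest) (some 1) none = rest := by
    rw [PySem.List.slice_some_none]
    have : PySem.List.clampIdx (s0 :: rest).length 1 = 1 := by
      have := PySem.List.clampIdx_natCast (s0 :: rest).length (1 : Nat)
      simpa using this
    rw [this]; rfl
  rw [hslice]
  have hinit : (PySem.List.pyGetD (s0 :: rest) 0 []).map (fun c => [c]) = pvStep [[]] s0 := by
    simp [PySem.List.pyGetD_zero_cons, pvStep]
  rw [hinit]
  rfl

-- the B-side foldl is pvDec
theorem B_fold (rls : List (List Char)) (k : Nat) (acc : List Char)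
    (h : ∀ s ∈ rls, s ≠ []) :
    (rls.foldl
      (fun (p : Int × List Char) s =>
        match PySem.Int.divmod? p.1 (PySem.List.len s) with
        | some qd => (qd.1, p.2 ++ [PySem.List.pyGetD s qd.2 ' '])
        | none => p) ((k : Int), acc)).2 = acc ++ (pvDec rls k).reverse := by
  induction rls generalizing k acc with
  | nil => simp [pvDec]
  | cons s rest ih =>
    have hs : s.length ≠ 0 := by
      intro e; exact h s (by simp) (List.eq_nil_of_length_eq_zero e)
    have hdm : PySem.Int.divmod? ((k : Nat) : Int) (PySem.List.len s)
        = some (((k / s.length : Nat) : Int), ((k % s.length : Nat) : Int)) := by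
      have h1 := PySem.Int.floordiv_natCast k s.length
      have h2 := PySem.Int.mod_natCast k s.length
      simp [PySem.Int.divmod?, PySem.List.len_eq, hs, PySem.Int.floordiv, PySem.Int.mod] at h1 h2 ⊢
      exact ⟨h1, h2⟩
    simp only [List.foldl_cons, hdm]
    rw [ih _ _ (fun t ht => h t (by simp [ht])), PySem.List.pyGetD_natCast]
    simp [pvDec]

theorem range_mul (P L : Nat) :
    List.range (P * L) = (List.range P).flatMap (fun q => (List.range L).map (fun r => q * L + r)) := by
  induction P with
  | zero => simp
  | succ P ih =>
    rw [Nat.succ_mul, List.range_add, ih, List.range_succ]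
    simp

theorem map_getD_range {β : Type} (s : List Char) (d : Char) (x : List Char)
    (h : List Char → Char → β) :
    (List.range s.length).map (fun r => h x (s.getD r d)) = s.map (fun y => h x y) := by
  apply List.ext_getElem
  · simp
  · intro i h1 h2
    have h1' : i < s.length := by simpa using h1
    simp [List.getD_eq_getElem?_getD, List.getElem?_eq_getElem h1']

theorem B2 (ls : List (List Char)) :
    (List.range (pvProd ls)).map (fun k => pvDec ls.reverse k) = pvR ls := by
  induction ls using List.reverseRecOn with
  | nil => simp [pvProd, pvR, pvDec]
  | append_singleton ls' s ih =>
    have hprod : pvProd (ls' ++ [s]) = pvProd ls' * s.length := by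
      simp [pvProd]
    have hR : pvR (ls' ++ [s]) = pvStep (pvR ls') s := by
      simp [pvR, List.foldl_append]
    rw [hprod, hR]
    rcases Nat.eq_zero_or_pos s.length with hL | hL
    · have : s = [] := List.eq_nil_of_length_eq_zero hL
      subst this
      simp [pvStep]
    · rw [range_mul, List.map_flatMap]
      have inner : (fun q => ((List.range s.length).map (fun r => q * s.length + r)).map
            (fun k => pvDec (ls' ++ [s]).reverse k))
          = (fun q => s.map (fun y => pvDec ls'.reverse q ++ [y])) := by
        funext q
        rw [List.map_map]
        have step1 : ∀ r ∈ List.range s.length,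
            pvDec (ls' ++ [s]).reverse (q * s.length + r)
              = pvDec ls'.reverse q ++ [s.getD r ' '] := by
          intro r hr
          have hrL : r < s.length := List.mem_range.mp hr
          have hdiv : (q * s.length + r) / s.length = q := by
            rw [Nat.mul_comm q s.length, Nat.mul_add_div hL]
            simp [Nat.div_eq_of_lt hrL]
          have hmod : (q * s.length + r) % s.length = r := by
            rw [Nat.add_comm, Nat.add_mul_mod_self_right]
            exact Nat.mod_eq_of_lt hrL
          simp only [List.reverse_append, List.reverse_cons, List.reverse_nil,
            List.nil_append, List.singleton_append, pvDec, hdiv, hmod]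
        rw [List.map_congr_left (fun r hr => by simpa using step1 r hr)]
        exact map_getD_range s ' ' (pvDec ls'.reverse q) (fun x y => x ++ [y])
      rw [inner, pvStep, ← ih, List.flatMap_map]

theorem total_eq_aux (ls : List (List Char)) (m : Nat) :
    ls.foldl (fun acc s => acc * PySem.List.len s) ((m : Nat) : Int)
      = ((ls.foldl (fun acc s => acc * s.length) m : Nat) : Int) := by
  induction ls generalizing m with
  | nil => rfl
  | cons s rest ih =>
    simp only [List.foldl_cons, PySem.List.len_eq]
    rw [show ((m : Nat) : Int) * ((s.length : Nat) : Int) = ((m * s.length : Nat) : Int) by push_cast; ring]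
    exact ih (m * s.length)

theorem total_eq (ls : List (List Char)) :
    ls.foldl (fun acc s => acc * PySem.List.len s) 1 = ((pvProd ls : Nat) : Int) := by
  have := total_eq_aux ls 1
  rw [show ((1 : Nat) : Int) = 1 from rfl] at this
  rw [this]
  congr 1
  rw [pvProd, List.prod_eq_foldl, List.foldl_map]

theorem B_eq (n : List Int) (hold : String) :
    mind_alt n hold = (pvR (mindSS n hold)).map String.ofList := by
  unfold mind_alt
  rw [ss_alt_eq, total_eq, PySem.List.pyRange_one]
  simp only [sub_zero, Int.toNat_natCast, List.map_map]
  rcases Nat.eq_zero_or_pos (pvProd (mindSS n hold)) with h0 | hpos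
  · rw [h0, ← B2 (mindSS n hold), h0]
    simp
  · have hne : ∀ s ∈ (mindSS n hold).reverse, s ≠ [] := by
      intro s hsm he
      subst he
      have : (0 : Nat) ∈ (mindSS n hold).map List.length := by
        simp only [List.mem_reverse] at hsm
        exact List.mem_map.mpr ⟨[], hsm, rfl⟩
      have : pvProd (mindSS n hold) = 0 := List.prod_eq_zero this
      omega
    rw [List.map_congr_left (g := fun k => String.ofList (pvDec (mindSS n hold).reverse k))
      (fun k hk => by
        simp only [Function.comp_apply, zero_add]
        rw [B_fold _ k [] hne]
        simp)]
    rw [← B2]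
    simp [List.map_map]

-- ===== VERDICT =====
theorem mind_spec : Claim_equal_mind := by
  intro n hold _ hpre
  unfold Spec_mind
  rw [A_eq n hold hpre.1, B_eq]
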